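-- pv_equiv track=rewrite | github.com/ferruano99/DAA | Examenes/ejerciciosrandom.py | ultimo_par
-- ===== SOURCE A (Python) =====
-- def ultimo_par(a, inicio, fin):
--     if inicio == fin:
--         return inicio
--     else:
--         mitad = (inicio + fin) // 2
--         if a[mitad] % 2 == 0:
--             vi = ultimo_par(a, mitad + 1, fin)
--             if vi % 2 == 0:
--                 return vi
--             else:
--                 return -1
--         else:
--             vd = ultimo_par(a, inicio, mitad)
--             if vd % 2 == 0:
--                 return vd
--             else:
--                 return -1
-- ===== SOURCE B (Python) =====
-- def ultimo_par(a, inicio, fin):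
--     # Iterative binary descent: collapse A's chained parity checks into one final check.
--     if inicio == fin:
--         return inicio
--     while inicio != fin:
--         mitad = (inicio + fin) // 2
--         if a[mitad] % 2 == 0:
--             inicio = mitad + 1
--         else:
--             fin = mitad
--     return inicio if inicio % 2 == 0 else -1
-- ===== Notes on version B (the rewrite author's own statement) =====
-- stated objective: simpler
-- what changed: Replaces A's recursion with chained parity re-checks at every unwind level by an iterative while-loop over (inicio, fin) plus a single final parity check (Python's -1 % 2 == 1 makes the chain collapse).
-- outside the precondition, e.g. on ultimo_par([0, -4, 2, 4], -5, -3): A returns -1, B returns -1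
import Mathlib
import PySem

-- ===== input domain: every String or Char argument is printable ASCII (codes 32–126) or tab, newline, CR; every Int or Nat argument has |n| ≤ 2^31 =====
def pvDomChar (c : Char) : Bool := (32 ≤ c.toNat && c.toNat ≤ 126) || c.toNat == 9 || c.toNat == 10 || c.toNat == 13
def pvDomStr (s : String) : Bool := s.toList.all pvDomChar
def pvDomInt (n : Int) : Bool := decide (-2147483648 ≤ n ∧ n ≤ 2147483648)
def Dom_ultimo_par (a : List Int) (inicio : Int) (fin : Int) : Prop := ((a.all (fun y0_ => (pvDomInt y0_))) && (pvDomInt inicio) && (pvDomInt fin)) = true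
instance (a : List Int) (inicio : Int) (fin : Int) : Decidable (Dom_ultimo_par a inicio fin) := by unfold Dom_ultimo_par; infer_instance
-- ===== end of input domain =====

-- B replaces A's recursive descent with chained parity checks at every unwind level by a
-- single iterative while-loop plus ONE final parity check (objective: simpler).

-- helper lemma the ports' termination proofs cite
theorem pv_mid_lt (inicio fin : Int) (h : inicio < fin) :
    inicio ≤ PySem.Int.floordiv (inicio + fin) 2 ∧ PySem.Int.floordiv (inicio + fin) 2 < fin := by
  rw [PySem.Int.floordiv_eq_ediv_of_pos (by omega)]
  omega

-- ===== PORT A =====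
-- literal transliteration of A; the `inicio < fin` guard and the `none => 0` arm only make the
-- recursion total: Python diverges when inicio > fin and raises IndexError on the `none` arm,
-- both excluded by Pre_ultimo_par.
def ultimo_par (a : List Int) (inicio : Int) (fin : Int) : Int :=
  if inicio = fin then inicio
  else if _h : inicio < fin then
    let mitad := PySem.Int.floordiv (inicio + fin) 2
    match PySem.List.pyGet? a mitad with
    | some v =>
      if PySem.Int.mod v 2 == 0 then
        let vi := ultimo_par a (mitad + 1) fin
        if PySem.Int.mod vi 2 == 0 then vi else -1
      else
        let vd := ultimo_par a inicio mitad
        if PySem.Int.mod vd 2 == 0 then vd else -1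
    | none => 0
  else 0
termination_by (fin - inicio).toNat
decreasing_by
  · have := pv_mid_lt inicio fin _h; omega
  · have := pv_mid_lt inicio fin _h; omega

-- ===== PORT B =====
-- the while-loop of Source B (state: inicio, fin); `none => 0` stands for the IndexError Python
-- B raises there, outside Pre_ultimo_par.
def ultimoParLoop (a : List Int) (inicio : Int) (fin : Int) : Int :=
  if _h : inicio < fin then
    let mitad := PySem.Int.floordiv (inicio + fin) 2
    match PySem.List.pyGet? a mitad with
    | some v =>
      if PySem.Int.mod v 2 == 0 then ultimoParLoop a (mitad + 1) fin
      else ultimoParLoop a inicio mitad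
    | none => 0
  else inicio
termination_by (fin - inicio).toNat
decreasing_by
  · have := pv_mid_lt inicio fin _h; omega
  · have := pv_mid_lt inicio fin _h; omega

def ultimo_par_alt (a : List Int) (inicio : Int) (fin : Int) : Int :=
  if inicio = fin then inicio
  else
    let j := ultimoParLoop a inicio fin
    if PySem.Int.mod j 2 == 0 then j else -1

-- ===== PRECONDITION & SPEC =====
-- Pre_ excludes inicio > fin (Python A recurses forever there) and descents that can leave the
-- index range [-len, len] (IndexError); it is conservative: a few out-of-range starts whose
-- descent happens to touch only valid indices still return in A — B returns the same value there.
def Pre_ultimo_par (a : List Int) (inicio : Int) (fin : Int) : Prop :=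
  inicio = fin ∨ (inicio < fin ∧ -(a.length : Int) ≤ inicio ∧ fin ≤ (a.length : Int))
instance (a : List Int) (inicio : Int) (fin : Int) : Decidable (Pre_ultimo_par a inicio fin) := by
  unfold Pre_ultimo_par; infer_instance

def pvWitness_ultimo_par : List Int × Int × Int := ([2, 4, 7, 6], 0, 3)

def Spec_ultimo_par (a : List Int) (inicio : Int) (fin : Int) (out : Int) : Prop := out = ultimo_par_alt a inicio fin
instance (a : List Int) (inicio : Int) (fin : Int) (out : Int) : Decidable (Spec_ultimo_par a inicio fin out) := by unfold Spec_ultimo_par; infer_instance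

-- ===== CLAIM (what is proved, stated in full; the proofs are below) =====
def Claim_equal_ultimo_par : Prop := ∀ (a : List Int) (inicio : Int) (fin : Int), Dom_ultimo_par a inicio fin → Pre_ultimo_par a inicio fin → Spec_ultimo_par a inicio fin (ultimo_par a inicio fin)

-- ===== LEMMAS AND PROOFS =====

theorem pv_collapse (L : Int) :
    (if PySem.Int.mod (if PySem.Int.mod L 2 == 0 then L else -1) 2 == 0 then
        (if PySem.Int.mod L 2 == 0 then L else -1) else -1)
      = (if PySem.Int.mod L 2 == 0 then L else -1) := by
  by_cases hL : PySem.Int.mod L 2 == 0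
  · simp only [if_pos hL]
  · simp only [if_neg hL]; decide

theorem ultimo_par_eq_loop (a : List Int) :
    ∀ (n : Nat) (i f : Int), (f - i).toNat = n → i < f →
      ultimo_par a i f =
        (if PySem.Int.mod (ultimoParLoop a i f) 2 == 0 then ultimoParLoop a i f else -1) := by
  intro n
  induction n using Nat.strong_induction_on with
  | _ n ih =>
    intro i f hn hlt
    have hne : i ≠ f := ne_of_lt hlt
    have hm := pv_mid_lt i f hlt
    rw [ultimo_par, ultimoParLoop]
    simp only [hne, if_false, dif_pos hlt]
    set m := PySem.Int.floordiv (i + f) 2 with hmdef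
    cases hg : PySem.List.pyGet? a m with
    | none => simp
    | some v =>
      by_cases hv : PySem.Int.mod v 2 == 0
      · simp only [hv, if_true]
        by_cases hend : m + 1 = f
        · rw [hend, ultimo_par, ultimoParLoop]
          simp only [dif_neg (lt_irrefl f), if_true]
        · have hlt2 : m + 1 < f := by omega
          rw [ih ((f - (m + 1)).toNat) (by omega) (m + 1) f rfl hlt2]
          exact pv_collapse (ultimoParLoop a (m + 1) f)
      · simp only [hv, if_false, Bool.false_eq_true]
        by_cases hstart : i = m
        · rw [← hstart, ultimo_par, ultimoParLoop]
          simp only [dif_neg (lt_irrefl i), if_true]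
        · have hlt2 : i < m := by omega
          rw [ih ((m - i).toNat) (by omega) i m rfl hlt2]
          exact pv_collapse (ultimoParLoop a i m)

-- ===== VERDICT (by name: the statement is the Claim_ definition above) =====
theorem ultimo_par_spec : Claim_equal_ultimo_par := by
  intro a i f _ hpre
  unfold Spec_ultimo_par ultimo_par_alt
  cases hpre with
  | inl he => subst he; rw [ultimo_par]; simp
  | inr h =>
    have hne : i ≠ f := ne_of_lt h.1
    simp only [hne, if_false]
    exact ultimo_par_eq_loop a _ i f rfl h.1
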